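-- pv_equiv track=rewrite | github.com/elksie5000/portfolio | organize_archive.py | fix_double_text
-- ===== SOURCE A (Python) =====
-- def fix_double_text(text):
--     """Fixes text that looks like 'TTHHEE QQUUIICCKK' -> 'THE QUICK'."""
--     if len(text) < 10:
--         return text
--
--     # Check if > 80% of NON-SPACE characters are doubled
--     # We iterate through the string, skipping spaces
--     non_space_chars = [c for c in text if not c.isspace()]
--     if len(non_space_chars) < 4:
--         return text
--
--     doubled_count = 0
--     # Check pairs in non_space_chars
--     # T T H H E E F F ...
--     for i in range(0, len(non_space_chars) - 1, 2):
--         if non_space_chars[i] == non_space_chars[i+1]: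
--             doubled_count += 1
--
--     ratio = doubled_count / (len(non_space_chars) / 2)
--
--     if ratio > 0.8:
--         # It's likely doubled. Deduplicate.
--         # We need to reconstruct carefully.
--         # If spaces are single but letters are double:
--         # TTHHEE FFAA -> THE FA
--         # We can just take every character that is DIFFERENT from the previous one?
--         # No, 'BOOK' -> 'BOK'.
--         # We should iterate and take char if it matches next char, skipping spaces?
--         # Or just simple: take every 2nd char if it's not a space?
--         # Actually, if spaces are single, we can't just do text[::2].
--         # TTHHEE FFAA
--         # 01234567890
--         # T T H H E E   F F A A
--         # Keep 0, 2, 4, 6(space), 7(skip), 8(keep)... tricky.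
--
--         # Simpler approach:
--         # Reconstruct: Iterate through text. If char == next_char, take it and skip next.
--         # If char is space, take it.
--         result = []
--         i = 0
--         while i < len(text):
--             if text[i].isspace():
--                 result.append(text[i])
--                 i += 1
--             elif i + 1 < len(text) and text[i] == text[i+1]:
--                 result.append(text[i])
--                 i += 2
--             else:
--                 # Mismatch or end of string.
--                 # If we are in "double mode", this might be a typo or just a single char.
--                 # Let's just keep it.
--                 result.append(text[i])
--                 i += 1
--         return "".join(result)
--
--     return text
-- ===== SOURCE B (Python) =====
-- def fix_double_text(text):
--     """Fixes text that looks like 'TTHHEE QQUUIICCKK' -> 'THE QUICK'."""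
--     if len(text) < 10:
--         return text
--     # Non-space characters via whitespace split + join (no per-char filter loop).
--     ns = "".join(text.split())
--     if len(ns) < 4:
--         return text
--     # Pair ns up two at a time with the zip(it, it) idiom and count equal pairs;
--     # doubled / (len(ns) / 2) > 0.8  <=>  5 * doubled > 2 * len(ns)  (exact).
--     it = iter(ns)
--     doubled = sum(1 for a, b in zip(it, it) if a == b)
--     if 5 * doubled <= 2 * len(ns):
--         return text
--     # Run-length reconstruction: a maximal run of k equal non-space characters
--     # collapses to ceil(k/2) copies (pairs absorb, a trailing odd one survives),
--     # while a run of spaces is kept whole.  This reproduces the pairwise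
--     # dedup loop because its pair-skips never cross a run boundary.
--     out = []
--     i, n = 0, len(text)
--     while i < n:
--         j = i
--         while j < n and text[j] == text[i]:
--             j += 1
--         k = j - i
--         out.append(text[i] * (k if text[i].isspace() else (k + 1) // 2))
--         i = j
--     return "".join(out)
-- ===== Notes on version B (the rewrite author's own statement) =====
-- stated objective: alternative
-- what changed: Detection drops A's filtered list + stepped-index loop for a whitespace split/join and the zip(it,it) pairing idiom with an exact integer threshold, and the reconstruction abandons A's character-by-character lookahead loop entirely for run-length encoding: each maximal run of k equal non-space chars is emitted as ceil(k/2) copies, space runs verbatim. (constant-factor win: split/join and run-length emission replace per-character Python-level loop work).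
import Mathlib
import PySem

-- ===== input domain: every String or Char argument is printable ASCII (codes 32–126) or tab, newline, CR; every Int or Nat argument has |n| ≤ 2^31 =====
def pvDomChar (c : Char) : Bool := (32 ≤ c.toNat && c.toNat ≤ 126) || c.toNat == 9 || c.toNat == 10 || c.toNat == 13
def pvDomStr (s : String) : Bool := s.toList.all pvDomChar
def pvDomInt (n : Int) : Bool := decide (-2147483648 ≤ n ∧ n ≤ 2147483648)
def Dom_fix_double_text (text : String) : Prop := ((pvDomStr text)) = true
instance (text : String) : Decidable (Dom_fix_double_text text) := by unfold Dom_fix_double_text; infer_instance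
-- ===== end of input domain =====

-- B replaces A's filtered-list detection and lookahead dedup loop by split/join + zip(it,it)
-- pair counting and run-length reconstruction (alternative decomposition, same cost; return value only).

-- ===== PORT A =====
-- the while-loop: index lookahead, advancing by 1 or 2
def fdtWhileA : List Char → List Char
  | [] => []
  | c :: rest =>
    if PySem.Chars.isspace c then c :: fdtWhileA rest
    else
      match rest with
      | c2 :: rest2 =>
        if c == c2 then c :: fdtWhileA rest2 else c :: fdtWhileA (c2 :: rest2)
      | [] => [c]
termination_by l => l.length
decreasing_by all_goals simp

def fix_double_text (text : String) : String :=
  if PySem.Str.len text < 10 then text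
  else
    let non_space_chars := text.toList.filter (fun c => !PySem.Chars.isspace c)
    if non_space_chars.length < 4 then text
    else
      let doubled_count : Int :=
        (PySem.List.pyRange 0 ((non_space_chars.length : Int) - 1) 2).foldl
          (fun acc i =>
            if PySem.List.pyGetD non_space_chars i ' ' == PySem.List.pyGetD non_space_chars (i + 1) ' '
            then acc + 1 else acc) 0
      -- 'doubled_count / (len/2) > 0.8' (float) ported exactly as the integer test
      -- 5*doubled_count > 2*len, which equals the float comparison for every reachable length
      if 5 * doubled_count > 2 * (non_space_chars.length : Int) then
        String.ofList (fdtWhileA text.toList)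
      else text

-- ===== PORT B =====
-- zip(it, it): pair consecutive elements two at a time
def fdtPairs : List Char → List (Char × Char)
  | a :: b :: t => (a, b) :: fdtPairs t
  | _ => []

-- run-length reconstruction: a maximal run of k equal non-space chars becomes ceil(k/2) copies
def fdtRuns : List Char → List Char
  | [] => []
  | c :: rest =>
    List.replicate
      (if PySem.Chars.isspace c then 1 + (rest.takeWhile (fun d => d == c)).length
       else (1 + (rest.takeWhile (fun d => d == c)).length + 1) / 2) c
      ++ fdtRuns (rest.dropWhile (fun d => d == c))
termination_by l => l.length
decreasing_by
  have := List.length_dropWhile_le (fun d => d == c) rest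
  simp
  omega

def fix_double_text_alt (text : String) : String :=
  if PySem.Str.len text < 10 then text
  else
    let ns := PySem.Chars.join [] (PySem.Chars.split₀ text.toList)
    if ns.length < 4 then text
    else
      let doubled : Int := ((fdtPairs ns).filter (fun p => p.1 == p.2)).length
      -- same exact integer form of the float threshold as A's port
      if 5 * doubled ≤ 2 * (ns.length : Int) then text
      else String.ofList (fdtRuns text.toList)

-- ===== PRECONDITION & SPEC =====
def Spec_fix_double_text (text : String) (out : String) : Prop := out = fix_double_text_alt text
instance (text : String) (out : String) : Decidable (Spec_fix_double_text text out) := by unfold Spec_fix_double_text; infer_instance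

-- ===== CLAIM (what is proved, stated in full; the proofs are below) =====
def Claim_equal_fix_double_text : Prop := ∀ (text : String), Dom_fix_double_text text → Spec_fix_double_text text (fix_double_text text)

-- ===== LEMMAS AND PROOFS =====

-- canonical doubled-pair count of a space-free list, two chars at a time
def fdtPc : List Char → Int
  | a :: b :: t => (if a == b then 1 else 0) + fdtPc t
  | _ => 0

-- ''.join(text.split()) is exactly the non-space characters in order
theorem fdt_go_flatten (s : List Char) (cur : List Char) (acc : List (List Char)) :
    (PySem.Chars.split₀.go s cur acc).flatten
      = acc.reverse.flatten ++ cur.reverse ++ s.filter (fun c => !PySem.Chars.isspace c) := by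
  induction s generalizing cur acc with
  | nil =>
    by_cases h : cur.isEmpty <;>
      simp_all [PySem.Chars.split₀.go, List.isEmpty_iff]
  | cons c rest ih =>
    by_cases hsp : PySem.Chars.isspace c
    · by_cases hc : cur.isEmpty <;>
        simp_all [PySem.Chars.split₀.go, List.isEmpty_iff]
    · simp [PySem.Chars.split₀.go, hsp, ih]

theorem fdt_ns_eq (l : List Char) :
    PySem.Chars.join [] (PySem.Chars.split₀ l) = l.filter (fun c => !PySem.Chars.isspace c) := by
  have hj : ∀ parts : List (List Char), PySem.Chars.join [] parts = parts.flatten := by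
    intro parts
    induction parts with
    | nil => rfl
    | cons p t ih =>
      cases t <;> simp_all [PySem.Chars.join, List.intercalate]
  rw [hj, PySem.Chars.split₀, fdt_go_flatten]
  simp

-- B's pair count equals the canonical count
theorem fdtPairs_count (l : List Char) :
    ((((fdtPairs l).filter (fun p => p.1 == p.2)).length : Int)) = fdtPc l := by
  induction l using fdtPc.induct with
  | case1 a b t ih =>
    simp only [fdtPairs, fdtPc, List.filter_cons]
    by_cases hab : (a == b) = true <;> simp [hab, ← ih] <;> ring
  | case2 l hl =>
    match l, hl with
    | [], _ => rfl
    | [a], _ => rfl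
    | a :: b :: t, hl => exact (hl a b t rfl).elim

-- the foldl over range(len/2) of even-index pair tests equals fdtPc
theorem fdtRange_count (l : List Char) (acc : Int) :
    (List.range (l.length / 2)).foldl
      (fun acc k => if l.getD (2 * k) ' ' == l.getD (2 * k + 1) ' ' then acc + 1 else acc) acc
      = acc + fdtPc l := by
  induction l using fdtPc.induct generalizing acc with
  | case1 a b t ih =>
    have hlen : (a :: b :: t).length / 2 = t.length / 2 + 1 := by simp; omega
    rw [hlen, List.range_succ_eq_map, List.foldl_cons, List.foldl_map]
    have hbody : (fun (acc : Int) (k : Nat) =>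
        if (a :: b :: t).getD (2 * Nat.succ k) ' ' == (a :: b :: t).getD (2 * Nat.succ k + 1) ' '
        then acc + 1 else acc)
        = fun (acc : Int) (k : Nat) =>
        if t.getD (2 * k) ' ' == t.getD (2 * k + 1) ' ' then acc + 1 else acc := by
      funext acc k
      have h1 : 2 * Nat.succ k = 2 * k + 1 + 1 := by omega
      rw [h1]
      simp
    rw [hbody, ih]
    simp only [List.getD_cons_succ, fdtPc]
    by_cases hab : a == b <;> simp [hab]
    ring
  | case2 l hl =>
    match l, hl with
    | [], _ => simp [fdtPc]
    | [a], _ => simp [fdtPc]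
    | a :: b :: t, hl => exact (hl a b t rfl).elim

-- A's pyRange foldl equals fdtPc
theorem fdtA_count (l : List Char) :
    (PySem.List.pyRange 0 ((l.length : Int) - 1) 2).foldl
      (fun acc i =>
        if PySem.List.pyGetD l i ' ' == PySem.List.pyGetD l (i + 1) ' '
        then acc + 1 else acc) 0 = fdtPc l := by
  rw [PySem.List.pyRange_of_pos 0 ((l.length : Int) - 1) (by norm_num)]
  have hcnt : (if (0 : Int) < (l.length : Int) - 1
      then ((((l.length : Int) - 1) - 0 + 2 - 1) / 2).toNat else 0) = l.length / 2 := by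
    split_ifs with h
    · omega
    · match l, h with
      | [], _ => simp
      | [a], _ => simp
      | a :: b :: t, h => simp at h
  rw [hcnt, List.foldl_map]
  have hbody : (fun (acc : Int) (k : Nat) =>
      if PySem.List.pyGetD l (0 + 2 * (k : Int)) ' ' == PySem.List.pyGetD l (0 + 2 * (k : Int) + 1) ' '
      then acc + 1 else acc)
      = fun (acc : Int) (k : Nat) =>
      if l.getD (2 * k) ' ' == l.getD (2 * k + 1) ' ' then acc + 1 else acc := by
    funext acc k
    have h1 : (0 + 2 * (k : Int)) = ((2 * k : Nat) : Int) := by push_cast; ring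
    have h2 : ((2 * k : Nat) : Int) + 1 = ((2 * k + 1 : Nat) : Int) := by push_cast; ring
    rw [h1, h2, PySem.List.pyGetD_natCast, PySem.List.pyGetD_natCast]
  rw [hbody, fdtRange_count]
  ring

-- A's loop across a run of spaces: every space is emitted
theorem fdtWhileA_space_run (n : Nat) (c : Char) (rest : List Char)
    (hsp : PySem.Chars.isspace c = true) :
    fdtWhileA (List.replicate n c ++ rest) = List.replicate n c ++ fdtWhileA rest := by
  induction n with
  | zero => simp
  | succ m ih =>
    rw [List.replicate_succ, List.cons_append, fdtWhileA.eq_def]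
    simp [hsp, ih]

-- A's loop across a maximal run of a non-space char: pairs absorb, a trailing odd one survives
theorem fdtWhileA_run (n : Nat) (c : Char) (rest : List Char)
    (hsp : PySem.Chars.isspace c = false)
    (hhd : ∀ d, rest.head? = some d → d ≠ c) :
    fdtWhileA (List.replicate n c ++ rest)
      = List.replicate ((n + 1) / 2) c ++ fdtWhileA rest := by
  induction n using Nat.strong_induction_on with
  | _ n ih =>
    match n with
    | 0 => simp
    | 1 =>
      rw [List.replicate_one, List.cons_append, fdtWhileA.eq_def]
      match rest, hhd with
      | [], _ => simp [hsp, fdtWhileA]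
      | d :: rest2, hhd =>
        have hd : d ≠ c := hhd d rfl
        have : (c == d) = false := by simp [Ne.symm hd]
        simp [hsp, this]
    | m + 2 =>
      have h2 : List.replicate (m + 2) c ++ rest = c :: c :: (List.replicate m c ++ rest) := by
        simp [List.replicate_succ]
      rw [h2, fdtWhileA.eq_def]
      simp only [hsp, Bool.false_eq_true, if_false, beq_self_eq_true, if_true]
      rw [ih m (by omega)]
      have : (m + 2 + 1) / 2 = (m + 1) / 2 + 1 := by omega
      rw [this, List.replicate_succ]
      simp

-- A's dedup loop IS run-length reconstruction
theorem fdtWhileA_eq_runs (l : List Char) : fdtWhileA l = fdtRuns l := by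
  induction hn : l.length using Nat.strong_induction_on generalizing l with
  | _ n ih =>
    match l with
    | [] => simp [fdtWhileA, fdtRuns]
    | c :: rest =>
      have htw : rest.takeWhile (fun d => d == c)
          = List.replicate (rest.takeWhile (fun d => d == c)).length c := by
        apply List.eq_replicate_of_mem
        intro b hb
        have hp : (b == c) = true := List.mem_takeWhile_imp (p := fun d => d == c) hb
        exact beq_iff_eq.mp hp
      have hsplit : c :: rest
          = List.replicate (1 + (rest.takeWhile (fun d => d == c)).length) c
            ++ rest.dropWhile (fun d => d == c) := by
        rw [Nat.add_comm, List.replicate_succ, List.cons_append]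
        congr 1
        rw [← htw]
        exact (List.takeWhile_append_dropWhile (p := fun d => d == c) (l := rest)).symm
      have hhd : ∀ d, (rest.dropWhile (fun d => d == c)).head? = some d → d ≠ c := by
        intro d hd
        have := List.head?_dropWhile_not (fun d => d == c) rest
        rw [hd] at this
        simpa using this
      have hlen : (rest.dropWhile (fun d => d == c)).length < n := by
        have := List.length_dropWhile_le (fun d => d == c) rest
        simp at hn
        omega
      have hrec : fdtWhileA (rest.dropWhile (fun d => d == c))
          = fdtRuns (rest.dropWhile (fun d => d == c)) :=
        ih _ hlen _ rfl
      rw [fdtRuns.eq_def]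
      by_cases hsp : PySem.Chars.isspace c
      · conv_lhs => rw [hsplit]
        rw [fdtWhileA_space_run _ _ _ hsp, hrec]
        simp [hsp]
      · conv_lhs => rw [hsplit]
        rw [fdtWhileA_run _ _ _ (by simpa using hsp) hhd, hrec]
        simp [hsp]

-- ===== VERDICT (by name: the statement is the Claim_ definition above) =====
theorem fix_double_text_spec : Claim_equal_fix_double_text := by
  intro text _
  unfold Spec_fix_double_text
  simp only [fix_double_text, fix_double_text_alt, fdt_ns_eq]
  set ns := text.toList.filter (fun c => !PySem.Chars.isspace c) with hns
  rw [fdtA_count ns, fdtPairs_count ns, fdtWhileA_eq_runs]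
  split_ifs <;> first | rfl | omega
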